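-- pv_equiv track=rewrite | github.com/hailpam/tech-interview-handbook | coding/array/equivalent_string_arrays.py | are_string_arrays_equivalent_no_join
-- ===== SOURCE A (Python) =====
-- def are_string_arrays_equivalent_no_join(word1, word2):
--     s_word1 = ''
--     for word in word1:
--         s_word1 += word
--
--     s_word2 = ''
--     for word in word2:
--         s_word2 += word
--
--     return s_word1 == s_word2
-- ===== SOURCE B (Python) =====
-- def are_string_arrays_equivalent_no_join(word1, word2):
--     # Stream characters of both lists lazily and compare with early mismatch exit;
--     # no intermediate concatenated strings are built.
--     it1 = (c for w in word1 for c in w)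
--     it2 = (c for w in word2 for c in w)
--     while True:
--         c1 = next(it1, None)
--         c2 = next(it2, None)
--         if c1 != c2:
--             return False
--         if c1 is None:
--             return True
-- ===== Notes on version B (the rewrite author's own statement) =====
-- stated objective: alternative
-- what changed: B streams the characters of both word lists through two lazy generators and compares them pairwise with an early exit on the first mismatch, instead of building two concatenated strings and comparing them at the end.
import Mathlib
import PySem

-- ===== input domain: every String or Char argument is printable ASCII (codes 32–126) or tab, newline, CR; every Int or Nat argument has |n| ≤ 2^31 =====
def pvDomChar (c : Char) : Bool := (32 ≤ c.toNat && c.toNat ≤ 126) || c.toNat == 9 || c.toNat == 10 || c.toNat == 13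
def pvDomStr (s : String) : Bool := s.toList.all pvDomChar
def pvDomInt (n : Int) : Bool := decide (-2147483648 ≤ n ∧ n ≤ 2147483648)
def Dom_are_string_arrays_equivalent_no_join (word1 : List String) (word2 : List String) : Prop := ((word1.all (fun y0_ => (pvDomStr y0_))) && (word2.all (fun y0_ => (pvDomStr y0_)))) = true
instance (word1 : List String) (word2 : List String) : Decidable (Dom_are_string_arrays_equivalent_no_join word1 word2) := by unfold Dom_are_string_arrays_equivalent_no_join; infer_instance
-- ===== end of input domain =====

-- B streams the characters of both lists and compares pairwise with early mismatch exit,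
-- instead of building two concatenated strings (objective: alternative algorithm, same cost).

-- ===== PORT A =====
-- strings are handled as their character lists (PySem convention); '+=' is list append
def are_string_arrays_equivalent_no_join (word1 : List String) (word2 : List String) : Bool :=
  let s_word1 := word1.foldl (fun s w => s ++ w.toList) ([] : List Char)
  let s_word2 := word2.foldl (fun s w => s ++ w.toList) ([] : List Char)
  s_word1 == s_word2

-- ===== PORT B =====
-- the two generators yield exactly the character streams of the flattened lists;
-- the while-loop is the pairwise comparison with early exit
def pvStreamCmp : List Char → List Char → Bool
  | [], [] => true
  | c1 :: t1, c2 :: t2 => if c1 = c2 then pvStreamCmp t1 t2 else false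
  | _, _ => false

def are_string_arrays_equivalent_no_join_alt (word1 : List String) (word2 : List String) : Bool :=
  pvStreamCmp (word1.flatMap String.toList) (word2.flatMap String.toList)

-- ===== PRECONDITION & SPEC =====
def Spec_are_string_arrays_equivalent_no_join (word1 : List String) (word2 : List String) (out : Bool) : Prop := out = are_string_arrays_equivalent_no_join_alt word1 word2
instance (word1 : List String) (word2 : List String) (out : Bool) : Decidable (Spec_are_string_arrays_equivalent_no_join word1 word2 out) := by unfold Spec_are_string_arrays_equivalent_no_join; infer_instance

-- ===== CLAIM (what is proved, stated in full; the proofs are below) =====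
def Claim_equal_are_string_arrays_equivalent_no_join : Prop := ∀ (word1 : List String) (word2 : List String), Dom_are_string_arrays_equivalent_no_join word1 word2 → Spec_are_string_arrays_equivalent_no_join word1 word2 (are_string_arrays_equivalent_no_join word1 word2)

-- ===== LEMMAS AND PROOFS =====
lemma pvStreamCmp_eq_beq (xs ys : List Char) : pvStreamCmp xs ys = (xs == ys) := by
  induction xs generalizing ys with
  | nil => cases ys <;> simp [pvStreamCmp]
  | cons c t ih =>
    cases ys with
    | nil => simp [pvStreamCmp]
    | cons d u =>
      by_cases h : c = d <;> simp [pvStreamCmp, h, ih]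

-- ===== VERDICT (by name: the statement is the Claim_ definition above) =====
theorem are_string_arrays_equivalent_no_join_spec : Claim_equal_are_string_arrays_equivalent_no_join := by
  intro word1 word2 _
  unfold Spec_are_string_arrays_equivalent_no_join
  unfold are_string_arrays_equivalent_no_join are_string_arrays_equivalent_no_join_alt
  simp [pvStreamCmp_eq_beq, List.flatMap_def]
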